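-- pv_equiv track=rewrite | github.com/EntityCuber/Energy_Fill | Energy_Fill.py | grid_height_list
-- ===== SOURCE A (Python) =====
-- def grid_height_list(x,max):
--     result = []
--     for i in range(max):
--         if (i<x):
--             result.append(1)
--         else:
--             result.append(0)
--     return result
-- ===== SOURCE B (Python) =====
-- def grid_height_list(x, max):
--     # count of i in range(max) with i < x is x clamped to [0, max]
--     ones = x if x < max else max
--     if ones < 0:
--         ones = 0
--     return [1] * ones + [0] * (max - ones)
-- ===== Notes on version B (the rewrite author's own statement) =====
-- stated objective: simpler
-- what changed: B replaces the per-index loop with a conditional append by one arithmetic clamp (ones = clamp(x,0,max)) and concatenation of two homogeneous runs built with list multiplication.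
import Mathlib
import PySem

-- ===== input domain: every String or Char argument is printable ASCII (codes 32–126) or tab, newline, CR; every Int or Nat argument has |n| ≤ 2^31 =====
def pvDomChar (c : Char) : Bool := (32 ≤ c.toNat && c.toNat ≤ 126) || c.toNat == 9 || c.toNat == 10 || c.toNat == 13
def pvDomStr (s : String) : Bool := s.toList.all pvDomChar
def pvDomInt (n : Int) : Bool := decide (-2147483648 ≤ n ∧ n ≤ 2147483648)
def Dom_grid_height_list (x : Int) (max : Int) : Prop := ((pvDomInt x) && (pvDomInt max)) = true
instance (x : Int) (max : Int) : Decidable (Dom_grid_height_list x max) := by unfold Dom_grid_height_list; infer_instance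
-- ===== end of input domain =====

-- B replaces the per-index loop with a conditional append by one arithmetic clamp and two homogeneous runs (objective: simpler).
-- ===== PORT A =====
def grid_height_list (x : Int) (max : Int) : List Int :=
  (PySem.List.pyRange 0 max 1).foldl (fun result i => result ++ [if i < x then (1:Int) else 0]) []

-- ===== PORT B =====
def grid_height_list_alt (x : Int) (max : Int) : List Int :=
  let ones0 : Int := if x < max then x else max
  let ones : Int := if ones0 < 0 then 0 else ones0
  PySem.List.pyRepeat [1] ones ++ PySem.List.pyRepeat [0] (max - ones)

-- ===== PRECONDITION & SPEC =====
def Spec_grid_height_list (x : Int) (max : Int) (out : List Int) : Prop := out = grid_height_list_alt x max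
instance (x : Int) (max : Int) (out : List Int) : Decidable (Spec_grid_height_list x max out) := by unfold Spec_grid_height_list; infer_instance

-- ===== CLAIM (what is proved, stated in full; the proofs are below) =====
def Claim_equal_grid_height_list : Prop := ∀ (x : Int) (max : Int), Dom_grid_height_list x max → Spec_grid_height_list x max (grid_height_list x max)

-- ===== LEMMAS AND PROOFS =====

-- ===== VERDICT (by name: the statement is the Claim_ definition above) =====
theorem grid_height_list_spec : Claim_equal_grid_height_list := by
  intro x max _
  unfold Spec_grid_height_list grid_height_list grid_height_list_alt
  simp only [PySem.List.foldl_append_singleton_eq_map, PySem.List.pyRange_one,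
    List.nil_append, List.map_map, PySem.List.pyRepeat_singleton]
  set ones0 : Int := if x < max then x else max with h0
  set ones : Int := if ones0 < 0 then 0 else ones0 with h1
  have hle : ones.toNat ≤ (max - 0).toNat := by
    split_ifs at h0 h1 <;> omega
  apply List.ext_getElem
  · simp [hle]; omega
  · intro k hk hk2
    have hn : k < (max - 0).toNat := by simpa using hk
    simp only [List.getElem_map, List.getElem_range, Function.comp]
    rw [List.getElem_append]
    by_cases hc : k < (List.replicate ones.toNat (1:Int)).length
    · simp only [hc, List.getElem_replicate]
      simp only [List.length_replicate] at hc
      have hlt : (k:Int) < x := by split_ifs at h0 h1 <;> omega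
      simp [hlt]
    · simp only [hc, List.getElem_replicate]
      simp only [List.length_replicate] at hc
      have hlt : ¬ ((k:Int) < x) := by split_ifs at h0 h1 <;> omega
      simp [hlt]
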